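-- pv_equiv track=rewrite | github.com/ruoqi-liu/KG-TREAT | model/modeling_kgtreat.py | resolve_types
-- ===== SOURCE A (Python) =====
-- from itertools import chain, product
-- from typing import Any, Callable, Dict, List, Optional, Set, Tuple, Union, get_type_hints
--
-- def split_types_repr(types_repr: str) -> List[str]:
--     out = []
--     i = depth = 0
--     for j, char in enumerate(types_repr):
--         if char == "[":
--             depth += 1
--         elif char == "]":
--             depth -= 1
--         elif char == "," and depth == 0:
--             out.append(types_repr[i:j].strip())
--             i = j + 1
--     out.append(types_repr[i:].strip())
--     return out
--
-- def resolve_types(arg_types: Dict[str, str], return_type_repr: str) -> List[Tuple[List[str], str]]: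
--     out = []
--     for type_repr in arg_types.values():
--         if type_repr[:5] == "Union":
--             out.append(split_types_repr(type_repr[6:-1]))
--         else:
--             out.append([type_repr])
--     return [(x, return_type_repr) for x in product(*out)]
-- ===== SOURCE B (Python) =====
-- def split_types_repr(types_repr):
--     # buffer-based scan: collect chars of the current segment instead of slicing by index
--     parts = []
--     buf = []
--     depth = 0
--     for ch in types_repr:
--         if ch == "[":
--             depth += 1
--             buf.append(ch)
--         elif ch == "]":
--             depth -= 1
--             buf.append(ch)
--         elif ch == "," and depth == 0:
--             parts.append("".join(buf).strip())
--             buf = []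
--         else:
--             buf.append(ch)
--     parts.append("".join(buf).strip())
--     return parts
--
-- def resolve_types(arg_types, return_type_repr):
--     # parse each argument type into its list of options
--     out = []
--     for type_repr in arg_types.values():
--         if type_repr[:5] == "Union":
--             out.append(split_types_repr(type_repr[6:-1]))
--         else:
--             out.append([type_repr])
--     # mixed-radix decoding: combination k has digit (k // radix-suffix) % len(opts)
--     # per position, last position varying fastest (product's lexicographic order)
--     total = 1
--     for options in out:
--         total *= len(options)
--     res = []
--     for k in range(total):
--         digits = []
--         for options in reversed(out):
--             k, r = divmod(k, len(options))
--             digits.append(options[r])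
--         digits.reverse()
--         res.append((tuple(digits), return_type_repr))
--     return res
-- ===== Notes on version B (the rewrite author's own statement) =====
-- stated objective: alternative
-- what changed: B rewrites split_types_repr as a buffer-accumulating scan (collecting the current segment's characters instead of slicing the string by saved indices) and replaces the itertools.product call with mixed-radix index decoding: each index k in range(product of option-list lengths) is decoded by repeated divmod, last argument fastest, reproducing product's lexicographic order without recursive expansion.
import Mathlib
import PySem

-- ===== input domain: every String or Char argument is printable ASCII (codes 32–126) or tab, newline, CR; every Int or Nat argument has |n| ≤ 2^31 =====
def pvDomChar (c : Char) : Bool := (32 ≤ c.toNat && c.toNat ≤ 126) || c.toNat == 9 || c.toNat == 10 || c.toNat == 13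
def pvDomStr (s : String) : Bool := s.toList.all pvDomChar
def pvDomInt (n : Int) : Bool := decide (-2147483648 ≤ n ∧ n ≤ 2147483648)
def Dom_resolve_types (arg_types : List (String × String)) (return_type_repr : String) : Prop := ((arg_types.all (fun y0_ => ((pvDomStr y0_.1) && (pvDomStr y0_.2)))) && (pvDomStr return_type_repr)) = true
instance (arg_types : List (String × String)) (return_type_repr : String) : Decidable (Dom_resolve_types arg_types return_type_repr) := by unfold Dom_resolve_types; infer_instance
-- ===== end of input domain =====

-- B rewrites split_types_repr as a buffer-accumulating scan and replaces itertools.product with mixed-radix index decoding (alternative algorithm, same cost).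
-- ===== PORT A =====
def split_types_repr (types_repr : String) : List String :=
  let st := (PySem.List.enumerate types_repr.toList 0).foldl
    (fun (st : List String × Int × Int) (jc : Int × Char) =>
      if jc.2 = '[' then (st.1, st.2.1, st.2.2 + 1)
      else if jc.2 = ']' then (st.1, st.2.1, st.2.2 - 1)
      else if jc.2 = ',' ∧ st.2.2 = 0 then
        (st.1 ++ [PySem.Str.strip (PySem.Str.slice types_repr (some st.2.1) (some jc.1))], jc.1 + 1, st.2.2)
      else st) ([], 0, 0)
  st.1 ++ [PySem.Str.strip (PySem.Str.slice types_repr (some st.2.1) none)]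

-- itertools.product(*out): the standard recursion giving product's lexicographic order (last factor fastest)
def pyProduct : List (List String) → List (List String)
  | [] => [[]]
  | l :: ls => l.flatMap (fun x => (pyProduct ls).map (fun ys => x :: ys))

def resolve_types (arg_types : List (String × String)) (return_type_repr : String) : List (List String × String) :=
  let out := arg_types.foldl
    (fun (acc : List (List String)) kv =>
      if PySem.Str.slice kv.2 none (some 5) = "Union" then
        acc ++ [split_types_repr (PySem.Str.slice kv.2 (some 6) (some (-1)))]
      else
        acc ++ [[kv.2]]) []
  (pyProduct out).map (fun x => (x, return_type_repr))

-- ===== PORT B =====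
-- Source B's buffer-based scan: chars of the current segment are accumulated, "".join(buf).strip() is
-- ported as String.ofList (PySem.Chars.strip buf) (exact: join of chars then strip)
def split_types_repr_b (types_repr : String) : List String :=
  let st := types_repr.toList.foldl
    (fun (st : List String × List Char × Int) (c : Char) =>
      if c = '[' then (st.1, st.2.1 ++ [c], st.2.2 + 1)
      else if c = ']' then (st.1, st.2.1 ++ [c], st.2.2 - 1)
      else if c = ',' ∧ st.2.2 = 0 then
        (st.1 ++ [String.ofList (PySem.Chars.strip st.2.1)], [], st.2.2)
      else (st.1, st.2.1 ++ [c], st.2.2)) ([], [], 0)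
  st.1 ++ [String.ofList (PySem.Chars.strip st.2.1)]

-- options[r] is ported as pyGetD with default "": exact because r = k % len(options) with
-- len(options) > 0 whenever the divmod is reached (total > 0 forces every radix > 0)
def resolve_types_alt (arg_types : List (String × String)) (return_type_repr : String) : List (List String × String) :=
  let out := arg_types.foldl
    (fun (acc : List (List String)) kv =>
      if PySem.Str.slice kv.2 none (some 5) = "Union" then
        acc ++ [split_types_repr_b (PySem.Str.slice kv.2 (some 6) (some (-1)))]
      else
        acc ++ [[kv.2]]) []
  let total := out.foldl (fun (t : Int) options => t * (options.length : Int)) 1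
  (PySem.List.pyRange 0 total 1).foldl
    (fun res k =>
      let st := out.reverse.foldl
        (fun (st : Int × List String) (options : List String) =>
          (PySem.Int.floordiv st.1 (options.length : Int),
           st.2 ++ [PySem.List.pyGetD options (PySem.Int.mod st.1 (options.length : Int)) ""]))
        (k, [])
      res ++ [(st.2.reverse, return_type_repr)]) []

-- ===== PRECONDITION & SPEC =====
def Spec_resolve_types (arg_types : List (String × String)) (return_type_repr : String) (out : List (List String × String)) : Prop := out = resolve_types_alt arg_types return_type_repr
instance (arg_types : List (String × String)) (return_type_repr : String) (out : List (List String × String)) : Decidable (Spec_resolve_types arg_types return_type_repr out) := by unfold Spec_resolve_types; infer_instance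

-- ===== CLAIM (what is proved, stated in full; the proofs are below) =====
def Claim_equal_resolve_types : Prop := ∀ (arg_types : List (String × String)) (return_type_repr : String), Dom_resolve_types arg_types return_type_repr → Spec_resolve_types arg_types return_type_repr (resolve_types arg_types return_type_repr)

-- ===== LEMMAS AND PROOFS =====
-- proof-only names for the two split loops' bodies
def pvStepA (s : String) (st : List String × Int × Int) (jc : Int × Char) : List String × Int × Int :=
  if jc.2 = '[' then (st.1, st.2.1, st.2.2 + 1)
  else if jc.2 = ']' then (st.1, st.2.1, st.2.2 - 1)
  else if jc.2 = ',' ∧ st.2.2 = 0 then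
    (st.1 ++ [PySem.Str.strip (PySem.Str.slice s (some st.2.1) (some jc.1))], jc.1 + 1, st.2.2)
  else st

def pvStepB (st : List String × List Char × Int) (c : Char) : List String × List Char × Int :=
  if c = '[' then (st.1, st.2.1 ++ [c], st.2.2 + 1)
  else if c = ']' then (st.1, st.2.1 ++ [c], st.2.2 - 1)
  else if c = ',' ∧ st.2.2 = 0 then
    (st.1 ++ [String.ofList (PySem.Chars.strip st.2.1)], [], st.2.2)
  else (st.1, st.2.1 ++ [c], st.2.2)

theorem strip_slice_eq (s : String) (i j : Nat) :
    PySem.Str.strip (PySem.Str.slice s (some (i : Int)) (some (j : Int)))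
      = String.ofList (PySem.Chars.strip ((s.toList.drop i).take (j - i))) := by
  apply String.toList_inj.mp
  rw [String.toList_ofList, PySem.Str.toList_strip, PySem.Str.toList_slice,
      PySem.Chars.slice_eq_listSlice, PySem.List.slice_natCast]

theorem strip_slice_from_eq (s : String) (i : Nat) :
    PySem.Str.strip (PySem.Str.slice s (some (i : Int)) none)
      = String.ofList (PySem.Chars.strip (s.toList.drop i)) := by
  apply String.toList_inj.mp
  rw [String.toList_ofList, PySem.Str.toList_strip, PySem.Str.toList_slice,
      PySem.Chars.slice_eq_listSlice, PySem.List.slice_from_natCast]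

-- the two scans agree: A's saved start index i corresponds to B's buffer s[i:j]
theorem split_loop_eq (s : String) (t : List Char) : ∀ (j i : Nat) (parts : List String) (depth : Int),
    s.toList.drop j = t → i ≤ j →
    (let ra := (PySem.List.enumerate t (j : Int)).foldl (pvStepA s) (parts, (i : Int), depth)
     ra.1 ++ [PySem.Str.strip (PySem.Str.slice s (some ra.2.1) none)])
      = (let rb := t.foldl pvStepB (parts, (s.toList.drop i).take (j - i), depth)
         rb.1 ++ [String.ofList (PySem.Chars.strip rb.2.1)]) := by
  induction t with
  | nil =>
    intro j i parts depth hdrop hij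
    have hlen : s.toList.length ≤ j := List.drop_eq_nil_iff.mp hdrop
    have htake : (s.toList.drop i).take (j - i) = s.toList.drop i :=
      List.take_of_length_le (by rw [List.length_drop]; omega)
    simp [PySem.List.enumerate, htake, strip_slice_from_eq]
  | cons c t ih =>
    intro j i parts depth hdrop hij
    have hj : j < s.toList.length := by
      by_contra h
      rw [List.drop_eq_nil_of_le (by omega)] at hdrop; simp at hdrop
    have hdrop' : s.toList.drop (j + 1) = t := by
      have : (s.toList.drop j).tail = t := by rw [hdrop]; rfl
      rwa [List.tail_drop] at this
    have hget : s.toList[j]'hj = c := by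
      have : (s.toList.drop j).head? = some c := by rw [hdrop]; rfl
      rw [List.head?_drop] at this
      simpa [List.getElem?_eq_getElem hj] using this
    have hbufext : ∀ i' : Nat, i' ≤ j →
        (s.toList.drop i').take (j - i') ++ [c] = (s.toList.drop i').take (j + 1 - i') := by
      intro i' hi'
      have h1 : j + 1 - i' = (j - i') + 1 := by omega
      rw [h1, List.take_add_one]
      have : (s.toList.drop i')[j - i']? = some c := by
        rw [List.getElem?_drop]
        have : i' + (j - i') = j := by omega
        rw [this, List.getElem?_eq_getElem hj, hget]
      simp [this]
    rw [PySem.List.enumerate_cons]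
    simp only [List.foldl_cons]
    have hcast : (j : Int) + 1 = ((j + 1 : Nat) : Int) := by push_cast; ring
    by_cases h1 : c = '['
    · rw [show pvStepA s (parts, (i : Int), depth) ((j : Int), c)
          = (parts, (i : Int), depth + 1) by simp [pvStepA, h1],
        show pvStepB (parts, (s.toList.drop i).take (j - i), depth) c
          = (parts, (s.toList.drop i).take (j - i) ++ [c], depth + 1) by simp [pvStepB, h1]]
      rw [hbufext i hij, hcast]
      exact ih (j + 1) i parts (depth + 1) hdrop' (by omega)
    · by_cases h2 : c = ']'
      · rw [show pvStepA s (parts, (i : Int), depth) ((j : Int), c)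
            = (parts, (i : Int), depth - 1) by simp [pvStepA, h2],
          show pvStepB (parts, (s.toList.drop i).take (j - i), depth) c
            = (parts, (s.toList.drop i).take (j - i) ++ [c], depth - 1) by simp [pvStepB, h2]]
        rw [hbufext i hij, hcast]
        exact ih (j + 1) i parts (depth - 1) hdrop' (by omega)
      · by_cases h3 : c = ',' ∧ depth = 0
        · rw [show pvStepA s (parts, (i : Int), depth) ((j : Int), c)
              = (parts ++ [PySem.Str.strip (PySem.Str.slice s (some (i : Int)) (some (j : Int)))], (j : Int) + 1, depth)
              by simp [pvStepA, h3.1, h3.2],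
            show pvStepB (parts, (s.toList.drop i).take (j - i), depth) c
              = (parts ++ [String.ofList (PySem.Chars.strip ((s.toList.drop i).take (j - i)))], [], depth)
              by simp [pvStepB, h3.1, h3.2]]
          rw [strip_slice_eq, hcast,
              show ([] : List Char) = (s.toList.drop (j + 1)).take ((j + 1) - (j + 1)) by simp]
          exact ih (j + 1) (j + 1)
            (parts ++ [String.ofList (PySem.Chars.strip ((s.toList.drop i).take (j - i)))]) depth hdrop' le_rfl
        · rw [show pvStepA s (parts, (i : Int), depth) ((j : Int), c)
              = (parts, (i : Int), depth) by simp [pvStepA, h1, h2]; intro hc hd; exact absurd ⟨hc, hd⟩ h3,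
            show pvStepB (parts, (s.toList.drop i).take (j - i), depth) c
              = (parts, (s.toList.drop i).take (j - i) ++ [c], depth)
              by simp [pvStepB, h1, h2]; intro hc hd; exact absurd ⟨hc, hd⟩ h3]
          rw [hbufext i hij, hcast]
          exact ih (j + 1) i parts depth hdrop' (by omega)

theorem split_types_repr_b_eq : split_types_repr_b = split_types_repr := by
  funext s
  have h := split_loop_eq s s.toList 0 0 [] 0 (by simp) le_rfl
  simp only [List.drop_zero, List.take_zero, Nat.sub_zero, Nat.cast_zero] at h
  unfold split_types_repr_b split_types_repr
  exact h.symm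

-- proof-only name for B's digit-extraction step and inner loop
def pvStep (st : Int × List String) (options : List String) : Int × List String :=
  (PySem.Int.floordiv st.1 (options.length : Int),
   st.2 ++ [PySem.List.pyGetD options (PySem.Int.mod st.1 (options.length : Int)) ""])

def pvDecode (out : List (List String)) (k : Int) : Int × List String :=
  out.reverse.foldl pvStep (k, [])

-- the digit list already collected is only appended to, never read
theorem foldl_pvStep_init (rls : List (List String)) (k : Int) (ds : List String) :
    rls.foldl pvStep (k, ds)
      = ((rls.foldl pvStep (k, []) ).1, ds ++ (rls.foldl pvStep (k, []) ).2) := by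
  induction rls generalizing k ds with
  | nil => simp
  | cons o rls ih =>
    simp only [List.foldl_cons]
    rw [ih (pvStep (k, ds) o).1 (pvStep (k, ds) o).2,
        ih (pvStep (k, []) o).1 (pvStep (k, []) o).2]
    simp [pvStep]

theorem pyProduct_snoc (ls : List (List String)) (l : List String) :
    pyProduct (ls ++ [l]) = (pyProduct ls).flatMap (fun p => l.map (fun x => p ++ [x])) := by
  induction ls with
  | nil =>
    simp [pyProduct]
    exact Eq.symm List.map_eq_flatMap
  | cons a ls ih =>
    simp [pyProduct, ih, List.flatMap_assoc, List.flatMap_map, List.map_flatMap, List.map_map,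
      Function.comp_def, List.cons_append]

theorem range_mul_flatMap (b a : Nat) :
    List.range (b * a) = (List.range b).flatMap (fun s => (List.range a).map (fun r => s * a + r)) := by
  induction b with
  | zero => simp
  | succ b ih =>
    rw [Nat.succ_mul, List.range_add, List.range_succ, ih]
    simp

-- mixed-radix decoding of 0,…,∏len−1 enumerates the product in lexicographic order
theorem pvDecode_range (ls : List (List String)) :
    (List.range ((ls.map List.length).prod)).map (fun (i : Nat) => (pvDecode ls ((i : Nat) : Int)).2.reverse)
      = pyProduct ls := by
  induction ls using List.reverseRecOn with
  | nil => simp [pvDecode, pyProduct]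
  | append_singleton ls l ih =>
    rcases Nat.eq_zero_or_pos l.length with ha | ha
    · rw [List.length_eq_zero_iff] at ha
      subst ha
      simp [pyProduct_snoc]
    · have hprod : ((ls ++ [l]).map List.length).prod = (ls.map List.length).prod * l.length := by
        simp
      rw [hprod, range_mul_flatMap, pyProduct_snoc, ← ih]
      simp only [List.map_flatMap, List.flatMap_map, List.map_map, Function.comp_def]
      congr 1
      funext s
      apply List.ext_getElem
      · simp
      · intro j hj1 hj2
        simp only [List.getElem_map, List.getElem_range]
        have hjl : j < l.length := by simpa using hj1
        have hdec : pvDecode (ls ++ [l]) ((s * l.length + j : Nat) : Int)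
            = ((pvDecode ls (s : Int)).1,
               PySem.List.pyGetD l ((j : Nat) : Int) "" :: (pvDecode ls (s : Int)).2) := by
          unfold pvDecode
          rw [List.reverse_append]
          simp only [List.reverse_singleton, List.singleton_append, List.foldl_cons]
          have hstep : pvStep (((s * l.length + j : Nat) : Int), []) l
              = ((s : Int), [PySem.List.pyGetD l ((j : Nat) : Int) ""]) := by
            unfold pvStep
            rw [PySem.Int.floordiv_natCast, PySem.Int.mod_natCast]
            have h1 : (s * l.length + j) / l.length = s := by
              rw [Nat.mul_comm s l.length, Nat.mul_add_div ha, Nat.div_eq_of_lt hjl]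
              simp
            have h2 : (s * l.length + j) % l.length = j := by
              rw [Nat.mul_comm s l.length, Nat.mul_add_mod, Nat.mod_eq_of_lt hjl]
            rw [h1, h2]
            simp
          rw [hstep, foldl_pvStep_init]
          rfl
        rw [hdec]
        simp only [List.reverse_cons]
        rw [PySem.List.pyGetD_eq_getElem l "" (by positivity) (by simpa using hjl)]
        simp

-- ===== VERDICT (by name: the statement is the Claim_ definition above) =====
theorem resolve_types_spec : Claim_equal_resolve_types := by
  intro arg_types return_type_repr _
  unfold Spec_resolve_types resolve_types resolve_types_alt
  have h : (fun (acc : List (List String)) (kv : String × String) =>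
        if PySem.Str.slice kv.2 none (some 5) = "Union" then
          acc ++ [split_types_repr (PySem.Str.slice kv.2 (some 6) (some (-1)))]
        else acc ++ [[kv.2]])
      = (fun acc kv => acc ++ [if PySem.Str.slice kv.2 none (some 5) = "Union" then
          split_types_repr (PySem.Str.slice kv.2 (some 6) (some (-1))) else [kv.2]]) := by
    funext acc kv; split <;> rfl
  have hb : (fun (acc : List (List String)) (kv : String × String) =>
        if PySem.Str.slice kv.2 none (some 5) = "Union" then
          acc ++ [split_types_repr_b (PySem.Str.slice kv.2 (some 6) (some (-1)))]
        else acc ++ [[kv.2]])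
      = (fun acc kv => acc ++ [if PySem.Str.slice kv.2 none (some 5) = "Union" then
          split_types_repr (PySem.Str.slice kv.2 (some 6) (some (-1))) else [kv.2]]) := by
    funext acc kv; rw [split_types_repr_b_eq]; split <;> rfl
  rw [h, hb, PySem.List.foldl_append_singleton_eq_map, PySem.List.foldl_append_singleton_eq_map]
  simp only [List.nil_append]
  set out := arg_types.map (fun kv => if PySem.Str.slice kv.2 none (some 5) = "Union" then
      split_types_repr (PySem.Str.slice kv.2 (some 6) (some (-1))) else [kv.2]) with hout
  have htot : out.foldl (fun (t : Int) options => t * (options.length : Int)) 1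
      = ((out.map List.length).prod : Nat) := by
    have : ∀ (ls : List (List String)) (c : Nat),
        ls.foldl (fun (t : Int) options => t * (options.length : Int)) (c : Int)
          = ((c * (ls.map List.length).prod : Nat) : Int) := by
      intro ls
      induction ls with
      | nil => intro c; simp
      | cons o ls ih =>
        intro c
        simp only [List.foldl_cons]
        rw [show ((c : Int) * (o.length : Int)) = ((c * o.length : Nat) : Int) by push_cast; ring,
            ih]
        push_cast [List.map_cons, List.prod_cons]
        ring
    simpa using this out 1
  rw [htot, PySem.List.pyRange_zero_natCast, List.map_map]
  calc (pyProduct out).map (fun x => (x, return_type_repr))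
      = ((List.range ((out.map List.length).prod)).map
          (fun (i : Nat) => (pvDecode out ((i : Nat) : Int)).2.reverse)).map
            (fun x => (x, return_type_repr)) := by
        rw [pvDecode_range out]
    _ = _ := by simp [Function.comp_def, pvDecode, pvStep]
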